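-- pv_equiv track=rewrite | github.com/zackseyun/cartha-translation | tools/jubilees/build_corpus.py | parse_chapter_spec
-- ===== SOURCE A (Python) =====
-- def parse_chapter_spec(spec: str, available: set[int]) -> list[int]:
--     if spec == "all":
--         return sorted(available)
--     out: set[int] = set()
--     for part in spec.split(","):
--         token = part.strip()
--         if not token:
--             continue
--         if "-" in token:
--             a, b = token.split("-", 1)
--             out.update(range(int(a), int(b) + 1))
--         else:
--             out.add(int(token))
--     return sorted(c for c in out if c in available)
-- ===== SOURCE B (Python) =====
-- def _as_interval(token: str) -> tuple[int, int]:
--     if "-" in token: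
--         a, b = token.split("-", 1)
--         return (int(a), int(b))
--     v = int(token)
--     return (v, v)
--
--
-- def parse_chapter_spec(spec: str, available: set[int]) -> list[int]:
--     if spec == "all":
--         return sorted(available)
--     tokens = [t for t in (p.strip() for p in spec.split(",")) if t]
--     intervals = [_as_interval(t) for t in tokens]
--     return sorted(c for c in set(available)
--                   if any(lo <= c <= hi for lo, hi in intervals))
-- ===== Notes on version B (the rewrite author's own statement) =====
-- stated objective: alternative
-- what changed: B replaces A's single fold that expands every range token into a growing integer set with staged passes: it first extracts the non-empty stripped tokens, maps each token to an interval (lo,hi) via a helper, and then filters the distinct available chapters by interval membership before sorting.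
import Mathlib
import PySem

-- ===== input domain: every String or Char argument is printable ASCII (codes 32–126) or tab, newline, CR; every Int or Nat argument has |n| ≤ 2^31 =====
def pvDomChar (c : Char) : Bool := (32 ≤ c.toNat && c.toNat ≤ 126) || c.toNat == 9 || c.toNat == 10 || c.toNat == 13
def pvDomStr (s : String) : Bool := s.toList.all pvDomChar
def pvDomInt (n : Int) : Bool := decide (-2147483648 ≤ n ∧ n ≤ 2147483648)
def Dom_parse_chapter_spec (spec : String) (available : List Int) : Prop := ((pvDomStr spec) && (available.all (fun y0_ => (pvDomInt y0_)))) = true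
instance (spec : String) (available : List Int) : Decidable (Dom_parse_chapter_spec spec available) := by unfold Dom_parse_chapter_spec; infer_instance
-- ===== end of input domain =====

-- B replaces A's single set-expanding fold by staged passes (extract tokens, map each to an
-- interval, filter the distinct available chapters by interval membership); alternative, not faster.

-- ===== PORT A =====
-- one loop iteration of A: out is the growing set; none = ValueError was raised
def pcsStepA (acc : Option (PySem.Set Int)) (part : String) : Option (PySem.Set Int) :=
  match acc with
  | none => none
  | some out =>
    let token := PySem.Str.strip part
    if token = "" then some out
    else if PySem.Str.isIn "-" token then
      match PySem.Str.splitMax? token "-" 1 with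
      | some [a, b] =>
        match PySem.Int.ofStr? a, PySem.Int.ofStr? b with
        | some ia, some ib => some (PySem.Set.update out (PySem.List.pyRange ia (ib + 1) 1))
        | _, _ => none
      | _ => none
    else
      match PySem.Int.ofStr? token with
      | some v => some (PySem.Set.add out v)
      | none => none

def parse_chapter_spec (spec : String) (available : List Int) : List Int :=
  if spec = "all" then PySem.List.sorted available (fun c => c) false
  else
    match ((PySem.Str.split? spec ",").getD []).foldl pcsStepA (some PySem.Set.empty) with
    | none => []   -- Python raises ValueError here; excluded by Pre_
    | some out =>
      PySem.List.sorted (out.filter (fun c => available.contains c)) (fun c => c) false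

-- ===== PORT B =====
-- Source B's _as_interval: a token becomes an interval; none = int() raised ValueError
def pcsAsInterval (token : String) : Option (Int × Int) :=
  if PySem.Str.isIn "-" token then
    match PySem.Str.splitMax? token "-" 1 with
    | some [a, b] =>
      match PySem.Int.ofStr? a, PySem.Int.ofStr? b with
      | some lo, some hi => some (lo, hi)
      | _, _ => none
    | _ => none
  else (PySem.Int.ofStr? token).map (fun v => (v, v))

def parse_chapter_spec_alt (spec : String) (available : List Int) : List Int :=
  if spec = "all" then PySem.List.sorted available (fun c => c) false
  else
    let tokens := (((PySem.Str.split? spec ",").getD []).map PySem.Str.strip).filter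
      (fun t => t != "")
    match tokens.mapM pcsAsInterval with
    | none => []   -- Python raises ValueError here; excluded by Pre_
    | some ivs =>
      PySem.List.sorted ((PySem.Set.ofList available).filter
        (fun c => ivs.any (fun p => decide (p.1 ≤ c) && decide (c ≤ p.2)))) (fun c => c) false

-- ===== PRECONDITION & SPEC =====
-- every non-empty stripped token must parse with int() (both halves, for a range token)
def pcsTokenOK (part : String) : Bool :=
  let token := PySem.Str.strip part
  token == "" ||
  (if PySem.Str.isIn "-" token then
    match PySem.Str.splitMax? token "-" 1 with
    | some [a, b] => (PySem.Int.ofStr? a).isSome && (PySem.Int.ofStr? b).isSome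
    | _ => false
   else (PySem.Int.ofStr? token).isSome)

-- Pre_ excludes exactly the specs on which Python's int() raises ValueError (malformed token);
-- A returns on every input Pre_ admits.
def Pre_parse_chapter_spec (spec : String) (available : List Int) : Prop :=
  spec = "all" ∨ ((PySem.Str.split? spec ",").getD []).all pcsTokenOK = true
instance (spec : String) (available : List Int) : Decidable (Pre_parse_chapter_spec spec available) := by unfold Pre_parse_chapter_spec; infer_instance

def pvWitness_parse_chapter_spec : String × List Int := ("1-3, 7", [1, 2, 3, 7, 9])

def Spec_parse_chapter_spec (spec : String) (available : List Int) (out : List Int) : Prop := out = parse_chapter_spec_alt spec available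
instance (spec : String) (available : List Int) (out : List Int) : Decidable (Spec_parse_chapter_spec spec available out) := by unfold Spec_parse_chapter_spec; infer_instance

-- ===== CLAIM (what is proved, stated in full; the proofs are below) =====
def Claim_equal_parse_chapter_spec : Prop := ∀ (spec : String) (available : List Int), Dom_parse_chapter_spec spec available → Pre_parse_chapter_spec spec available → Spec_parse_chapter_spec spec available (parse_chapter_spec spec available)

-- ===== LEMMAS AND PROOFS =====

-- joint invariant: A's fold succeeds and its set is out's elements plus everything covered by
-- the intervals that B's staged passes extract from the same parts
lemma pcs_fold_tok (parts : List String) (out : PySem.Set Int)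
    (hok : parts.all pcsTokenOK = true) (hnd : out.Nodup) :
    ∃ out' ivs, parts.foldl pcsStepA (some out) = some out' ∧
      ((parts.map PySem.Str.strip).filter (fun t => t != "")).mapM pcsAsInterval = some ivs ∧
      out'.Nodup ∧
      (∀ c : Int, c ∈ out' ↔ (c ∈ out ∨ ∃ p ∈ ivs, p.1 ≤ c ∧ c ≤ p.2)) := by
  induction parts generalizing out with
  | nil => exact ⟨out, [], rfl, rfl, hnd, by simp⟩
  | cons part rest ih =>
    simp only [List.all_cons, Bool.and_eq_true] at hok
    obtain ⟨hok1, hokr⟩ := hok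
    simp only [List.foldl_cons, List.map_cons]
    unfold pcsTokenOK at hok1
    simp only [Bool.or_eq_true, beq_iff_eq] at hok1
    by_cases hemp : PySem.Str.strip part = ""
    · have hA : pcsStepA (some out) part = some out := by simp [pcsStepA, hemp]
      rw [hA]
      have hf : ((PySem.Str.strip part :: rest.map PySem.Str.strip).filter (fun t => t != ""))
          = (rest.map PySem.Str.strip).filter (fun t => t != "") := by
        simp [hemp]
      rw [hf]
      exact ih out hokr hnd
    · replace hok1 := hok1.resolve_left hemp
      have hf : ((PySem.Str.strip part :: rest.map PySem.Str.strip).filter (fun t => t != ""))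
          = PySem.Str.strip part :: (rest.map PySem.Str.strip).filter (fun t => t != "") := by
        simp [hemp]
      rw [hf]
      by_cases hdash : PySem.Str.isIn "-" (PySem.Str.strip part) = true
      · have hdashC : PySem.Chars.isIn ['-'] (PySem.Chars.strip part.toList) = true := by
          simpa using hdash
        rw [if_pos hdash] at hok1
        rcases hsp : PySem.Str.splitMax? (PySem.Str.strip part) "-" 1 with _ | l
        · rw [hsp] at hok1; simp at hok1
        · rcases l with _ | ⟨a, _ | ⟨b, _ | ⟨c0, tl⟩⟩⟩ <;> rw [hsp] at hok1 <;>
            [skip; skip; skip; simp at hok1] <;> try simp at hok1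
          simp only [Option.isSome_iff_exists] at hok1
          obtain ⟨⟨ia, ha⟩, ⟨ib, hb⟩⟩ := hok1
          have hA : pcsStepA (some out) part =
              some (PySem.Set.update out (PySem.List.pyRange ia (ib + 1) 1)) := by
            simp [pcsStepA, hemp, hdashC, hsp, ha, hb]
          have hT : pcsAsInterval (PySem.Str.strip part) = some (ia, ib) := by
            simp [pcsAsInterval, hdashC, hsp, ha, hb]
          rw [hA]
          obtain ⟨out', ivs, h1, h2, h3, h4⟩ :=
            ih (PySem.Set.update out (PySem.List.pyRange ia (ib + 1) 1)) hokr
              (PySem.Set.nodup_update _ _ hnd)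
          refine ⟨out', (ia, ib) :: ivs, h1, ?_, h3, ?_⟩
          · simp [List.mapM_cons, hT, h2]
          · intro c
            have hiff : ia ≤ c ∧ c < ib + 1 ↔ ia ≤ c ∧ c ≤ ib := by omega
            rw [h4 c]
            simp only [PySem.Set.mem_update, PySem.List.mem_pyRange_one, hiff,
              List.mem_cons]
            constructor
            · rintro (⟨hc | h⟩ | ⟨p, hp, h1', h2'⟩)
              · exact Or.inl hc
              · exact Or.inr ⟨(ia, ib), Or.inl rfl, h.1, h.2⟩
              · exact Or.inr ⟨p, Or.inr hp, h1', h2'⟩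
            · rintro (hc | ⟨p, rfl | hp, h1', h2'⟩)
              · exact Or.inl (Or.inl hc)
              · exact Or.inl (Or.inr ⟨h1', h2'⟩)
              · exact Or.inr ⟨p, hp, h1', h2'⟩
      · have hdashC : PySem.Chars.isIn ['-'] (PySem.Chars.strip part.toList) = false := by
          simpa using hdash
        rw [if_neg hdash] at hok1
        rw [Option.isSome_iff_exists] at hok1
        obtain ⟨v, hv⟩ := hok1
        have hA : pcsStepA (some out) part = some (PySem.Set.add out v) := by
          simp [pcsStepA, hemp, hdashC, hv]
        have hT : pcsAsInterval (PySem.Str.strip part) = some (v, v) := by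
          simp [pcsAsInterval, hdashC, hv]
        rw [hA]
        obtain ⟨out', ivs, h1, h2, h3, h4⟩ :=
          ih (PySem.Set.add out v) hokr (PySem.Set.nodup_add _ _ hnd)
        refine ⟨out', (v, v) :: ivs, h1, ?_, h3, ?_⟩
        · simp [List.mapM_cons, hT, h2]
        · intro c
          rw [h4 c]
          simp only [PySem.Set.mem_add, List.mem_cons]
          constructor
          · rintro (⟨hc | rfl⟩ | ⟨p, hp, h1', h2'⟩)
            · exact Or.inl hc
            · exact Or.inr ⟨(c, c), Or.inl rfl, le_refl c, le_refl c⟩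
            · exact Or.inr ⟨p, Or.inr hp, h1', h2'⟩
          · rintro (hc | ⟨p, rfl | hp, h1', h2'⟩)
            · exact Or.inl (Or.inl hc)
            · exact Or.inl (Or.inr (le_antisymm h2' h1'))
            · exact Or.inr ⟨p, hp, h1', h2'⟩

-- ===== VERDICT (by name: the statement is the Claim_ definition above) =====
theorem parse_chapter_spec_spec : Claim_equal_parse_chapter_spec := by
  intro spec available hdom hpre
  unfold Spec_parse_chapter_spec parse_chapter_spec parse_chapter_spec_alt
  by_cases hall : spec = "all"
  · simp [hall]
  · rw [if_neg hall, if_neg hall]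
    rcases hpre with h | hok
    · exact absurd h hall
    obtain ⟨out', ivs, hA, hB, hnd, hmem⟩ :=
      pcs_fold_tok ((PySem.Str.split? spec ",").getD []) PySem.Set.empty hok
        (by simp [PySem.Set.empty])
    rw [hA]
    simp only []
    rw [hB]
    refine PySem.List.sorted_eq_sorted_of_perm _ _ _ (fun a b h => h) ?_
    rw [List.perm_ext_iff_of_nodup (List.Nodup.filter _ hnd)
      (List.Nodup.filter _ (PySem.Set.nodup_ofList _))]
    intro c
    simp only [List.mem_filter, hmem c, PySem.Set.mem_ofList, List.any_eq_true,
      Bool.and_eq_true, decide_eq_true_eq, List.contains_eq_mem]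
    constructor
    · rintro ⟨hout | ⟨p, hp, h1, h2⟩, hav⟩
      · simp [PySem.Set.empty] at hout
      · exact ⟨by simpa using hav, p, hp, h1, h2⟩
    · rintro ⟨hav, p, hp, h1, h2⟩
      exact ⟨Or.inr ⟨p, hp, h1, h2⟩, by simpa using hav⟩
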